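-- pv_equiv track=rewrite | github.com/isaacrestrick/algorithms-and-data-structures | binarysearch.py | greatest_less_than
-- ===== SOURCE A (Python) =====
-- def greatest_less_than(arr, target):
--     lo, hi = 0, len(arr)
--     while lo < hi:
--         mid = (lo + hi) // 2
--         if arr[mid] > target:
--             hi = mid
--         else:
--             lo = mid + 1
--     return lo if lo < len(arr) else -1
-- ===== SOURCE B (Python) =====
-- def greatest_less_than(arr, target):
--     # divide-and-conquer on list SLICES: no index bounds are maintained; the sublist
--     # itself shrinks, and `base` records how many elements were discarded on the left
--     def ub(xs, base):
--         if not xs: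
--             return base
--         m = len(xs) // 2
--         if xs[m] > target:
--             return ub(xs[:m], base)
--         return ub(xs[m + 1:], base + m + 1)
--     r = ub(arr, 0)
--     return r if r < len(arr) else -1
-- ===== Notes on version B (the rewrite author's own statement) =====
-- stated objective: alternative
-- what changed: the iterative lo/hi index loop is replaced by a recursion on list slices: the helper physically cuts the list at the midpoint (xs[:m] / xs[m+1:]) and carries only a left-offset accumulator, probing the same midpoints
import Mathlib
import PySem

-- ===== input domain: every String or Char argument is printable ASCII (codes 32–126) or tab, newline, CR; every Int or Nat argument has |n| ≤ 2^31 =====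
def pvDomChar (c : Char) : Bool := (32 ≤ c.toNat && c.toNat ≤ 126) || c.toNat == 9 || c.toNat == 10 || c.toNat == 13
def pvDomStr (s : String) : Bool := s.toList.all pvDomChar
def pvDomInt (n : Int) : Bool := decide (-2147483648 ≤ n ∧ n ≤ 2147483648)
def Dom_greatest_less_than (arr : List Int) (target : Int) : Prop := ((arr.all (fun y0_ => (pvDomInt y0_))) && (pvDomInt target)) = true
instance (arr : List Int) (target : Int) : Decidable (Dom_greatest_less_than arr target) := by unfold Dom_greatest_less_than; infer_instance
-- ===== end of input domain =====

-- B replaces A's iterative lo/hi index loop by a recursion on list slices (cut at the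
-- midpoint, carry a left-offset accumulator); it probes the same midpoints, so values agree.


-- ===== PORT A =====
-- A's while-loop as recursion on the loop state (lo, hi); lo ≤ mid < hi ≤ len holds
-- throughout, so the Nat index and `getD` are exact for Python's arr[mid] (it never raises).
def gltLoop (arr : List Int) (target : Int) (lo hi : Nat) : Nat :=
  if _h : lo < hi then
    let mid := (lo + hi) / 2
    if arr.getD mid 0 > target then gltLoop arr target lo mid
    else gltLoop arr target (mid + 1) hi
  else lo
termination_by hi - lo
decreasing_by all_goals omega

def greatest_less_than (arr : List Int) (target : Int) : Int :=
  let lo := gltLoop arr target 0 arr.length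
  if lo < arr.length then (lo : Int) else -1

-- ===== PORT B =====
-- B's helper recurses on the sublist itself: xs[:m] is List.take m, xs[m+1:] is List.drop (m+1);
-- xs[m] with m = len//2 < len is in range, so `getD` is exact.
def gltUb (target : Int) (xs : List Int) (base : Nat) : Nat :=
  if _h : xs = [] then base
  else
    let m := xs.length / 2
    if xs.getD m 0 > target then gltUb target (xs.take m) base
    else gltUb target (xs.drop (m + 1)) (base + m + 1)
termination_by xs.length
decreasing_by
  · simp only [List.length_take]; have := List.length_pos_iff.mpr _h; omega
  · simp only [List.length_drop]; have := List.length_pos_iff.mpr _h; omega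

def greatest_less_than_alt (arr : List Int) (target : Int) : Int :=
  let r := gltUb target arr 0
  if r < arr.length then (r : Int) else -1

-- ===== PRECONDITION & SPEC =====
def Spec_greatest_less_than (arr : List Int) (target : Int) (out : Int) : Prop := out = greatest_less_than_alt arr target
instance (arr : List Int) (target : Int) (out : Int) : Decidable (Spec_greatest_less_than arr target out) := by unfold Spec_greatest_less_than; infer_instance

-- ===== CLAIM (what is proved, stated in full; the proofs are below) =====
def Claim_equal_greatest_less_than : Prop := ∀ (arr : List Int) (target : Int), Dom_greatest_less_than arr target → Spec_greatest_less_than arr target (greatest_less_than arr target)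

-- ===== LEMMAS AND PROOFS =====

-- The slice recursion on the window arr[lo:hi] equals the index loop on (lo, hi):
-- the window's midpoint is the loop's midpoint, and cutting the window is moving a bound.
theorem gltUb_eq_loop (arr : List Int) (target : Int) :
    ∀ k lo hi, hi ≤ arr.length → lo ≤ hi → k = hi - lo →
      gltUb target ((arr.drop lo).take k) lo = gltLoop arr target lo hi := by
  intro k
  induction k using Nat.strong_induction_on with
  | _ k ih =>
    intro lo hi hle hlohi hk
    rw [gltUb, gltLoop]
    have hseg : ((arr.drop lo).take k).length = k := by
      simp [List.length_take, List.length_drop]; omega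
    by_cases h0 : k = 0
    · have : lo = hi := by omega
      simp [h0, this]
    · have hne : ((arr.drop lo).take k) ≠ [] := by
        intro h; rw [h] at hseg; simp at hseg; omega
      have hlt : lo < hi := by omega
      simp only [hne, hlt, dif_neg, dif_pos, not_false_iff, hseg]
      have hmid : (lo + hi) / 2 = lo + k / 2 := by omega
      have hget : ((arr.drop lo).take k).getD (k / 2) 0 = arr.getD ((lo + hi) / 2) 0 := by
        rw [List.getD_eq_getElem?_getD, List.getD_eq_getElem?_getD,
            List.getElem?_take, List.getElem?_drop, hmid]
        simp only [if_pos (by omega : k / 2 < k)]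
      rw [hget]
      split
      · have ht : ((arr.drop lo).take k).take (k / 2) = (arr.drop lo).take (k / 2) := by
          rw [List.take_take]; congr 1; omega
        rw [ht, ih (k / 2) (by omega) lo (lo + k / 2) (by omega) (by omega) (by omega), hmid]
      · have hd : ((arr.drop lo).take k).drop (k / 2 + 1)
            = (arr.drop (lo + (k / 2 + 1))).take (k - (k / 2 + 1)) := by
          rw [List.drop_take, List.drop_drop]
        rw [hd, hmid]
        have hm : k - (k / 2 + 1) < k := by omega
        have hb1 : lo + k / 2 + 1 ≤ hi := by omega
        have hb2 : k - (k / 2 + 1) = hi - (lo + k / 2 + 1) := by omega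
        have := ih (k - (k / 2 + 1)) hm (lo + k / 2 + 1) hi hle hb1 hb2
        rw [show lo + (k / 2 + 1) = lo + k / 2 + 1 by omega, this]

-- ===== VERDICT (by name: the statement is the Claim_ definition above) =====
theorem greatest_less_than_spec : Claim_equal_greatest_less_than := by
  intro arr target _
  unfold Spec_greatest_less_than greatest_less_than greatest_less_than_alt
  have := gltUb_eq_loop arr target arr.length 0 arr.length le_rfl (by omega) (by omega)
  simp only [List.drop_zero, List.take_length] at this
  rw [this]
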